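-- pv_equiv track=rewrite | github.com/isk02206/python | informatics/previous informatics/Infomatics-1/Info_grroup_serise5/Ubbi_Dubbi.py | text2ubbi
-- ===== SOURCE A (Python) =====
-- def text2ubbi(sen):
--
--     vowel1 = 'aeiou'
--     vowel2 = 'AEIOU'
--
--     list1 = sen.split(' ')
--     list2 = []
--
--     for word in list1:
--
--         std = len(word)
--
--         word2 = word[0]
--
--         pos = 1
--
--         while pos < std and pos >= 0:
--
--             if word[pos] not in vowel1:
--
--                 word2 += word[pos]
--
--
--             elif word[pos] in vowel1:
--
--
--                 if word[pos-1] not in vowel1: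
--
--                     word2 += 'ub' + word[pos]
--
--                 else:
--                     word2 += word[pos]
--
--             pos += 1
--
--         if word[0].isupper():
--
--             if word[0] in vowel2:
--
--                 word2 = 'Ub' + word2[0].lower() + word2[1:]
--
--             else:
--                 word2 = word2[0].upper() + word2[1:]
--
--         elif word[0] in vowel1:
--
--             word2 = 'ub' + word2
--
--
--         list2.append(word2)
--
--         word2 = ''
--
--     return ' '.join(list2)
-- ===== SOURCE B (Python) =====
-- def text2ubbi(sen):
--     # Staged whole-string rewriting instead of a per-character scan:
--     # 1) insert 'ub' before EVERY lowercase vowel with str.replace passes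
--     #    ('u' first so later passes never touch inserted marker text),
--     # 2) cancel the insertions that follow a lowercase vowel with the
--     #    replace passes v+'ub' -> v,
--     # 3) fix the first letter of words starting with an uppercase vowel.
--     out = []
--     for word in sen.split(' '):
--         t = word
--         for v in 'uaeio':
--             t = t.replace(v, 'ub' + v)
--         for v in 'aeiou':
--             t = t.replace(v + 'ub', v)
--         if word[0] in 'AEIOU':
--             t = 'Ub' + word[0].lower() + t[1:]
--         out.append(t)
--     return ' '.join(out)
-- ===== Notes on version B (the rewrite author's own statement) =====
-- stated objective: faster
-- what changed: B replaces A's per-word index loop (word[pos]/word[pos-1] with a position counter and quadratic char-by-char string building) by staged whole-string rewriting: five str.replace passes insert 'ub' before every lowercase vowel, five passes v+'ub' -> v cancel the insertions that follow a lowercase vowel, and one branch fixes words starting with an uppercase vowel.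
-- outside the precondition, e.g. on text2ubbi(' '): A raises IndexError, B raises IndexError; on text2ubbi(''): A raises IndexError, B raises IndexError
import Mathlib
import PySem

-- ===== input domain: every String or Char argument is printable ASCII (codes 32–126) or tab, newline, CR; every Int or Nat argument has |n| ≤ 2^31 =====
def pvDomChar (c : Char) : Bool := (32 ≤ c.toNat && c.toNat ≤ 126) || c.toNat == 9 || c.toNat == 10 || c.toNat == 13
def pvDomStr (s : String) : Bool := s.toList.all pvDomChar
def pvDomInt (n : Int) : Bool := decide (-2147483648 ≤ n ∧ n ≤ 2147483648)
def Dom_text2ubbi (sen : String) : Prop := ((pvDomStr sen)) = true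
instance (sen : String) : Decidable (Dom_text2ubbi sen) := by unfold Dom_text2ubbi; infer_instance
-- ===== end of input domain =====

-- B replaces A's per-word index loop by staged whole-string str.replace passes
-- (insert 'ub' before every lowercase vowel, then cancel the insertions that follow a
-- lowercase vowel), same return value on Pre_ (objective: faster; measured faster in a timing run).

-- ===== PORT A =====
def pvVowL : List Char := ['a', 'e', 'i', 'o', 'u']
def pvVowU : List Char := ['A', 'E', 'I', 'O', 'U']

-- literal transliteration of A's per-word body: while loop over pos = 1..len-1, then the
-- capitalisation step.  word[0] on an empty word raises IndexError in Python (excluded by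
-- Pre_); the port reads it with pyGet? and a default there.
def pvAWord (word : List Char) : List Char :=
  let std : Int := PySem.Chars.len word
  let w0 : Char := (PySem.List.pyGet? word 0).getD ' '
  let word2 : List Char :=
    (PySem.List.pyRange 1 std 1).foldl (fun acc pos =>
      if (PySem.List.pyGetD word pos ' ') ∉ pvVowL then
        acc ++ [PySem.List.pyGetD word pos ' ']
      else
        if (PySem.List.pyGetD word (pos - 1) ' ') ∉ pvVowL then
          acc ++ ('u' :: 'b' :: [PySem.List.pyGetD word pos ' '])
        else
          acc ++ [PySem.List.pyGetD word pos ' ']) [w0]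
  if PySem.Chars.isupper w0 then
    if w0 ∈ pvVowU then
      'U' :: 'b' :: PySem.Chars.lowerChar ((PySem.List.pyGet? word2 0).getD ' ') ::
        PySem.List.slice word2 (some 1) none
    else
      PySem.Chars.upperChar ((PySem.List.pyGet? word2 0).getD ' ') ::
        PySem.List.slice word2 (some 1) none
  else if w0 ∈ pvVowL then
    'u' :: 'b' :: word2
  else
    word2

def text2ubbi (sen : String) : String :=
  let list1 := (PySem.Chars.split? sen.toList [' ']).getD []
  let list2 := list1.foldl (fun acc word => acc ++ [pvAWord word]) ([] : List (List Char))
  String.ofList (PySem.Chars.join [' '] list2)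

-- ===== PORT B =====
-- Source B's per-word body: five replace passes inserting 'ub' before every lowercase vowel
-- ('u' first, as in Source B), five replace passes v+'ub' -> v cancelling the insertions that
-- follow a lowercase vowel, then the uppercase-vowel first-letter fix.  word[0] is read
-- with pyGet? and a default (Pre_ excludes the empty words where Python raises).
def pvVowIns : List Char := ['u', 'a', 'e', 'i', 'o']

def pvBWord (word : List Char) : List Char :=
  let t1 := pvVowIns.foldl (fun t v => PySem.Chars.replace t [v] ('u' :: 'b' :: [v])) word
  let t2 := pvVowL.foldl (fun t v => PySem.Chars.replace t (v :: 'u' :: ['b']) [v]) t1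
  let w0 : Char := (PySem.List.pyGet? word 0).getD ' '
  if w0 ∈ pvVowU then
    'U' :: 'b' :: PySem.Chars.lowerChar w0 :: PySem.List.slice t2 (some 1) none
  else
    t2

def text2ubbi_alt (sen : String) : String :=
  let out := ((PySem.Chars.split? sen.toList [' ']).getD []).foldl
    (fun acc word => acc ++ [pvBWord word]) ([] : List (List Char))
  String.ofList (PySem.Chars.join [' '] out)

-- ===== PRECONDITION & SPEC =====
-- Pre_ excludes exactly the inputs with an empty piece in sen.split(' ') (empty string,
-- leading/trailing or doubled spaces): there Python's word[0] raises IndexError in A (and in B).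
def Pre_text2ubbi (sen : String) : Prop :=
  ∀ w ∈ (PySem.Chars.split? sen.toList [' ']).getD [], w ≠ []
instance (sen : String) : Decidable (Pre_text2ubbi sen) := by unfold Pre_text2ubbi; infer_instance

def pvWitness_text2ubbi : String := "Hello open Air"

def Spec_text2ubbi (sen : String) (out : String) : Prop := out = text2ubbi_alt sen
instance (sen : String) (out : String) : Decidable (Spec_text2ubbi sen out) := by unfold Spec_text2ubbi; infer_instance

-- ===== CLAIM (what is proved, stated in full; the proofs are below) =====
def Claim_equal_text2ubbi : Prop := ∀ (sen : String), Dom_text2ubbi sen → Pre_text2ubbi sen → Spec_text2ubbi sen (text2ubbi sen)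

-- ===== LEMMAS AND PROOFS =====

-- fuel-free structural version of PySem.Chars.replace (for a nonempty pattern)
def pvRepF (old new : List Char) : List Char → List Char
  | [] => []
  | c :: t =>
    if old.isPrefixOf (c :: t) then new ++ pvRepF old new (t.drop (old.length - 1))
    else c :: pvRepF old new t
termination_by l => l.length
decreasing_by
  · simp only [List.length_drop, List.length_cons]; omega
  · simp only [List.length_cons]; omega

theorem pvGo_eq (old new : List Char) (hold : old ≠ []) :
    ∀ (fuel : Nat) (l acc : List Char), l.length ≤ fuel →
      PySem.Chars.replace.go old new fuel l acc = acc.reverse ++ pvRepF old new l := by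
  intro fuel
  induction fuel with
  | zero =>
    intro l acc h
    have : l = [] := by cases l <;> simp_all
    subst this
    simp [PySem.Chars.replace.go, pvRepF]
  | succ n ih =>
    intro l acc h
    cases l with
    | nil => simp [PySem.Chars.replace.go, pvRepF]
    | cons c t =>
      rw [PySem.Chars.replace.go, pvRepF]
      by_cases hp : old.isPrefixOf (c :: t) = true
      · rw [if_pos hp, if_pos hp]
        obtain ⟨o, os, rfl⟩ : ∃ o os, old = o :: os := by
          cases old with
          | nil => exact absurd rfl hold
          | cons o os => exact ⟨o, os, rfl⟩
        have hdrop : List.drop (o :: os).length (c :: t) = t.drop ((o :: os).length - 1) := by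
          simp [List.length_cons]
        rw [hdrop, ih _ _ (by simp only [List.length_drop]; simp only [List.length_cons] at h; omega)]
        simp
      · rw [if_neg hp, if_neg hp, ih _ _ (by simp at h ⊢; omega)]
        simp

theorem pvReplace_eq (s old new : List Char) (hold : old ≠ []) :
    PySem.Chars.replace s old new = pvRepF old new s := by
  rw [PySem.Chars.replace]
  have he : old.isEmpty = false := by simp [hold]
  rw [he]
  simp only [Bool.false_eq_true, if_false]
  rw [pvGo_eq old new hold s.length s [] le_rfl]
  simp


-- the two-state description of Source B's intermediate strings: pvTt S prev t is the
-- transform of the word tail t when the vowels in S have already had their cancel pass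
def pvTt (S : List Char) : Char → List Char → List Char
  | _, [] => []
  | prev, c :: t =>
    (if c ∈ pvVowL ∧ prev ∉ S then 'u' :: 'b' :: [c] else [c]) ++ pvTt S c t

def pvT (S : List Char) : List Char → List Char
  | [] => []
  | c :: t => (if c ∈ pvVowL then 'u' :: 'b' :: [c] else [c]) ++ pvTt S c t

-- replace with a single-char pattern is a character substitution
theorem pvRepF_single (v : Char) (new : List Char) (l : List Char) :
    pvRepF [v] new l = l.flatMap (fun c => if c = v then new else [c]) := by
  induction l with
  | nil => simp [pvRepF]
  | cons c t ih =>
    rw [pvRepF]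
    by_cases h : c = v
    · subst h; simp [List.isPrefixOf, ih]
    · have : ([v].isPrefixOf (c :: t)) = false := by
        simp [List.isPrefixOf]; exact fun he => absurd he.symm h
      simp [this, ih, h]

-- the five insertion passes put 'ub' before every lowercase vowel
theorem pvIns_eq (w : List Char) :
    pvVowIns.foldl (fun t v => PySem.Chars.replace t [v] ('u' :: 'b' :: [v])) w
      = w.flatMap (fun c => if c ∈ pvVowL then 'u' :: 'b' :: [c] else [c]) := by
  have h1 : ∀ (l : List Char) (v : Char),
      PySem.Chars.replace l [v] ('u' :: 'b' :: [v])
        = l.flatMap (fun c => if c = v then 'u' :: 'b' :: [v] else [c]) := by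
    intro l v; rw [pvReplace_eq _ _ _ (by simp), pvRepF_single]
  simp only [pvVowIns, List.foldl_cons, List.foldl_nil, h1, List.flatMap_assoc]
  have h2 : ∀ c : Char,
      (if c = 'u' then 'u' :: 'b' :: ['u'] else [c]).flatMap (fun c =>
        (if c = 'a' then 'u' :: 'b' :: ['a'] else [c]).flatMap (fun c =>
          (if c = 'e' then 'u' :: 'b' :: ['e'] else [c]).flatMap (fun c =>
            (if c = 'i' then 'u' :: 'b' :: ['i'] else [c]).flatMap (fun c =>
              if c = 'o' then 'u' :: 'b' :: ['o'] else [c]))))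
        = (if c ∈ pvVowL then 'u' :: 'b' :: [c] else [c]) := by
    intro c
    by_cases hc : c ∈ pvVowL
    · fin_cases hc <;> decide
    · simp only [pvVowL, List.mem_cons, List.not_mem_nil, or_false] at hc
      push Not at hc
      obtain ⟨h1, h2, h3, h4, h5⟩ := hc
      simp [h1, h2, h3, h4, h5, pvVowL]
  exact List.flatMap_congr (fun c _ => h2 c)

theorem pvTt_nil (t : List Char) (prev : Char) :
    pvTt [] prev t = t.flatMap (fun c => if c ∈ pvVowL then 'u' :: 'b' :: [c] else [c]) := by
  induction t generalizing prev with
  | nil => simp [pvTt]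
  | cons c t ih => simp [pvTt, ih]

theorem pvT_nil (w : List Char) :
    w.flatMap (fun c => if c ∈ pvVowL then 'u' :: 'b' :: [c] else [c]) = pvT [] w := by
  cases w with
  | nil => simp [pvT]
  | cons c t => simp [pvT, pvTt_nil]

-- the cancel pass for vowel v turns state S into state v :: S (core invariant):
-- scanning from a payload character prev, the pattern v+'ub' matches exactly at a
-- payload v directly followed by a still-marked vowel
theorem pvRepF_Tt (v : Char) (hv : v ∈ pvVowL) (S : List Char) (hvS : v ∉ S) :
    ∀ (t : List Char) (prev : Char),
      pvRepF (v :: 'u' :: ['b']) [v] (prev :: pvTt S prev t)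
        = prev :: pvTt (v :: S) prev t := by
  have hvb : v ≠ 'b' := by fin_cases hv <;> decide
  intro t
  induction t with
  | nil =>
    intro prev
    rw [pvTt, pvTt, pvRepF]
    have : ((v :: 'u' :: ['b']).isPrefixOf (prev :: ([] : List Char))) = false := by
      simp [List.isPrefixOf]
    simp [this, pvRepF]
  | cons c t' ih =>
    intro prev
    by_cases hm : c ∈ pvVowL ∧ prev ∉ S
    · rw [pvTt, if_pos hm]
      by_cases hpv : prev = v
      · subst hpv
        -- prev = v: the pattern matches at the payload and removes the next marker
        simp only [List.cons_append, List.nil_append]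
        rw [pvRepF]
        have hpre : ((prev :: 'u' :: ['b']).isPrefixOf (prev :: 'u' :: 'b' :: c :: pvTt S c t')) = true := by
          simp [List.isPrefixOf]
        rw [hpre]
        simp only [if_true]
        have hd : List.drop ((prev :: 'u' :: ['b']).length - 1) ('u' :: 'b' :: c :: pvTt S c t')
            = c :: pvTt S c t' := by simp
        rw [hd, ih c, pvTt, if_neg (by simp : ¬ (c ∈ pvVowL ∧ prev ∉ prev :: S))]
        simp
      · -- prev ≠ v: three no-match steps walk over prev and the kept marker
        have h1 : ((v :: 'u' :: ['b']).isPrefixOf (prev :: 'u' :: 'b' :: c :: pvTt S c t')) = false := by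
          simp [List.isPrefixOf]
          intro h; exact absurd h.symm hpv
        have h2 : ((v :: 'u' :: ['b']).isPrefixOf ('u' :: 'b' :: c :: pvTt S c t')) = false := by
          simp [List.isPrefixOf]
        have h3 : ((v :: 'u' :: ['b']).isPrefixOf ('b' :: c :: pvTt S c t')) = false := by
          simp [List.isPrefixOf]
          exact fun h => (hvb h).elim
        rw [List.cons_append, List.cons_append, List.cons_append, List.nil_append]
        rw [pvRepF, h1]
        simp only [Bool.false_eq_true, if_false]
        rw [pvRepF, h2]
        simp only [Bool.false_eq_true, if_false]
        rw [pvRepF, h3]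
        simp only [Bool.false_eq_true, if_false]
        rw [ih c, pvTt, if_pos (⟨hm.1, by simp [hm.2]; exact fun h => hpv h⟩ :
          c ∈ pvVowL ∧ prev ∉ v :: S)]
        simp
    · rw [pvTt, if_neg hm]
      have hnm : ((v :: 'u' :: ['b']).isPrefixOf (prev :: c :: pvTt S c t')) = false := by
        simp [List.isPrefixOf]
        intro h1 h2
        exfalso
        exact hm ⟨h2 ▸ (by decide : 'u' ∈ pvVowL), h1 ▸ hvS⟩
      rw [List.singleton_append, pvRepF, hnm]
      simp only [Bool.false_eq_true, if_false, ih c]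
      rw [pvTt]
      have : ¬ (c ∈ pvVowL ∧ prev ∉ v :: S) := by
        intro h
        rcases not_and_or.mp hm with h1 | h2
        · exact h1 h.1
        · exact h.2 (by simp [not_not.mp h2])
      rw [if_neg this]
      simp
theorem pvRepF_T (v : Char) (hv : v ∈ pvVowL) (S : List Char) (hvS : v ∉ S) (w : List Char) :
    pvRepF (v :: 'u' :: ['b']) [v] (pvT S w) = pvT (v :: S) w := by
  have hvb : v ≠ 'b' := by fin_cases hv <;> decide
  cases w with
  | nil => simp [pvT, pvRepF]
  | cons c t =>
    rw [pvT, pvT]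
    by_cases hc : c ∈ pvVowL
    · rw [if_pos hc]
      simp only [List.cons_append, List.nil_append]
      have h2 : ((v :: 'u' :: ['b']).isPrefixOf ('u' :: 'b' :: c :: pvTt S c t)) = false := by
        simp [List.isPrefixOf]
      have h3 : ((v :: 'u' :: ['b']).isPrefixOf ('b' :: c :: pvTt S c t)) = false := by
        simp [List.isPrefixOf]
        exact fun h => (hvb h).elim
      rw [pvRepF, h2]
      simp only [Bool.false_eq_true, if_false]
      rw [pvRepF, h3]
      simp only [Bool.false_eq_true, if_false]
      rw [pvRepF_Tt v hv S hvS t c]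
    · rw [if_neg hc]
      simp only [List.singleton_append]
      rw [pvRepF_Tt v hv S hvS t c]

-- the five cancel passes leave exactly the markers whose predecessor is not a lowercase vowel
theorem pvCollapse_eq (w : List Char) :
    pvVowL.foldl (fun t v => PySem.Chars.replace t (v :: 'u' :: ['b']) [v]) (pvT [] w)
      = pvT ['u', 'o', 'i', 'e', 'a'] w := by
  simp only [pvVowL, List.foldl_cons, List.foldl_nil]
  rw [pvReplace_eq _ _ _ (by simp), pvReplace_eq _ _ _ (by simp),
    pvReplace_eq _ _ _ (by simp), pvReplace_eq _ _ _ (by simp), pvReplace_eq _ _ _ (by simp)]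
  rw [pvRepF_T 'a' (by decide) [] (by decide) w,
    pvRepF_T 'e' (by decide) ['a'] (by decide) w,
    pvRepF_T 'i' (by decide) ['e', 'a'] (by decide) w,
    pvRepF_T 'o' (by decide) ['i', 'e', 'a'] (by decide) w,
    pvRepF_T 'u' (by decide) ['o', 'i', 'e', 'a'] (by decide) w]

-- A's visited pairs built over the final state: the zip form of the loop equals pvTt full
theorem pvPairs_Tt (t : List Char) (prev : Char) :
    (List.zip (prev :: t) t).flatMap (fun pc =>
        if pc.2 ∈ pvVowL ∧ pc.1 ∉ pvVowL then 'u' :: 'b' :: [pc.2] else [pc.2])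
      = pvTt ['u', 'o', 'i', 'e', 'a'] prev t := by
  induction t generalizing prev with
  | nil => simp [pvTt]
  | cons c t' ih =>
    rw [List.zip_cons_cons, List.flatMap_cons, pvTt, ih c]
    have hmem : prev ∉ pvVowL ↔ prev ∉ (['u', 'o', 'i', 'e', 'a'] : List Char) := by
      simp [pvVowL]; tauto
    by_cases h : c ∈ pvVowL ∧ prev ∉ pvVowL
    · rw [if_pos h, if_pos ⟨h.1, hmem.mp h.2⟩]
    · rw [if_neg h, if_neg (fun hx => h ⟨hx.1, hmem.mpr hx.2⟩)]
-- the index pairs (word[pos-1], word[pos]) visited by A's loop are exactly zip word word.tail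
theorem pvPairs_eq (w : List Char) (d : Char) :
    (PySem.List.pyRange 1 (PySem.Chars.len w) 1).map
      (fun pos => (PySem.List.pyGetD w (pos - 1) d, PySem.List.pyGetD w pos d)) =
    w.zip w.tail := by
  apply List.ext_getElem
  · simp [PySem.Chars.len, PySem.List.length_pyRange_one]
  · intro k h1 h2
    have hk : k + 1 < w.length := by
      simp [List.length_zip] at h2; omega
    have hb : k < w.length := by omega
    simp only [List.getElem_map, List.getElem_zip, PySem.List.getElem_pyRange_one]
    have e1 : (1 : Int) + (k : Int) - 1 = ((k : Nat) : Int) := by omega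
    have e2 : (1 : Int) + (k : Int) = (((k + 1 : Nat)) : Int) := by push_cast; ring
    rw [e1, e2, PySem.List.pyGetD_natCast, PySem.List.pyGetD_natCast]
    simp [hb, hk, List.getElem_tail]

theorem pvFlat_eq (w : List Char) :
    (PySem.List.pyRange 1 (PySem.Chars.len w) 1).flatMap (fun pos =>
      (fun pc : Char × Char =>
        if pc.2 ∈ pvVowL ∧ pc.1 ∉ pvVowL then 'u' :: 'b' :: [pc.2] else [pc.2])
      (PySem.List.pyGetD w (pos - 1) ' ', PySem.List.pyGetD w pos ' ')) =
    (w.zip w.tail).flatMap (fun pc =>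
      if pc.2 ∈ pvVowL ∧ pc.1 ∉ pvVowL then 'u' :: 'b' :: [pc.2] else [pc.2]) := by
  rw [← pvPairs_eq w ' ', List.flatMap_map]

theorem pvIsupper_upperChar {c : Char} (h : PySem.Chars.isupper c = true) :
    PySem.Chars.upperChar c = c := by
  have h2 : c ≤ 'Z' := by
    simp [PySem.Chars.isupper] at h
    exact h.2
  have h3 : ¬ ('a' ≤ c) := fun hc => absurd (hc.trans h2) (by decide)
  simp [PySem.Chars.upperChar, PySem.Chars.islower, h3]

-- A's capitalisation step equals B's single-branch one, for loop result c0 :: X and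
-- B's collapse result (block of c0) ++ X
theorem pvCap_eq (c0 : Char) (X : List Char) :
    (if PySem.Chars.isupper c0 then
      if c0 ∈ pvVowU then
        'U' :: 'b' :: PySem.Chars.lowerChar ((PySem.List.pyGet? (c0 :: X) 0).getD ' ') ::
          PySem.List.slice (c0 :: X) (some 1) none
      else
        PySem.Chars.upperChar ((PySem.List.pyGet? (c0 :: X) 0).getD ' ') ::
          PySem.List.slice (c0 :: X) (some 1) none
    else if c0 ∈ pvVowL then 'u' :: 'b' :: (c0 :: X)
    else (c0 :: X)) =
    (if c0 ∈ pvVowU then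
      'U' :: 'b' :: PySem.Chars.lowerChar c0 ::
        PySem.List.slice ((if c0 ∈ pvVowL then 'u' :: 'b' :: [c0] else [c0]) ++ X) (some 1) none
    else (if c0 ∈ pvVowL then 'u' :: 'b' :: [c0] else [c0]) ++ X) := by
  have hget : (PySem.List.pyGet? (c0 :: X) 0).getD ' ' = c0 := by
    simp [PySem.List.pyGet?, PySem.List.pyIdx?]
  rw [hget]
  by_cases hU : c0 ∈ pvVowU
  · have hup : PySem.Chars.isupper c0 = true := by
      fin_cases hU <;> decide
    have hL : c0 ∉ pvVowL := by
      fin_cases hU <;> decide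
    rw [if_pos hup, if_pos hU, if_pos hU, if_neg hL]
    have h1 : PySem.List.slice (c0 :: X) (some 1) none = X := by simp [PySem.List.slice_from]
    have h2 : PySem.List.slice ([c0] ++ X) (some 1) none = X := by simp [PySem.List.slice_from]
    rw [h1, h2]
  · by_cases hup : PySem.Chars.isupper c0 = true
    · have hL : c0 ∉ pvVowL := by
        intro hm
        have h2 : c0 ≤ 'Z' := by
          simp [PySem.Chars.isupper] at hup
          exact hup.2
        fin_cases hm <;> exact absurd h2 (by decide)
      rw [if_pos hup, if_neg hU, if_neg hU, if_neg hL]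
      have h1 : PySem.List.slice (c0 :: X) (some 1) none = X := by simp [PySem.List.slice_from]
      rw [h1, pvIsupper_upperChar hup]
      simp
    · rw [if_neg hup, if_neg hU]
      by_cases hL : c0 ∈ pvVowL
      · rw [if_pos hL, if_pos hL]; simp
      · rw [if_neg hL, if_neg hL]; simp

-- per-word equality, for the nonempty words Pre_ admits
theorem pvWord_eq (c0 : Char) (t : List Char) : pvAWord (c0 :: t) = pvBWord (c0 :: t) := by
  unfold pvAWord pvBWord
  dsimp only []
  rw [pvIns_eq, pvT_nil, pvCollapse_eq]
  have hstep :
      (PySem.List.pyRange 1 (PySem.Chars.len (c0 :: t)) 1).foldl (fun acc pos =>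
        if (PySem.List.pyGetD (c0 :: t) pos ' ') ∉ pvVowL then
          acc ++ [PySem.List.pyGetD (c0 :: t) pos ' ']
        else
          if (PySem.List.pyGetD (c0 :: t) (pos - 1) ' ') ∉ pvVowL then
            acc ++ ('u' :: 'b' :: [PySem.List.pyGetD (c0 :: t) pos ' '])
          else
            acc ++ [PySem.List.pyGetD (c0 :: t) pos ' '])
        [(PySem.List.pyGet? (c0 :: t) 0).getD ' '] =
      (PySem.List.pyRange 1 (PySem.Chars.len (c0 :: t)) 1).foldl (fun acc pos =>
        acc ++ ((fun pc : Char × Char =>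
          if pc.2 ∈ pvVowL ∧ pc.1 ∉ pvVowL then 'u' :: 'b' :: [pc.2] else [pc.2])
          (PySem.List.pyGetD (c0 :: t) (pos - 1) ' ', PySem.List.pyGetD (c0 :: t) pos ' ')))
        [(PySem.List.pyGet? (c0 :: t) 0).getD ' '] := by
    apply PySem.List.foldl_congr_mem
    intro acc pos _
    by_cases h2 : (PySem.List.pyGetD (c0 :: t) pos ' ') ∈ pvVowL <;>
      by_cases h1 : (PySem.List.pyGetD (c0 :: t) (pos - 1) ' ') ∈ pvVowL <;>
      simp [h1, h2]
  rw [hstep, PySem.List.foldl_append_eq_flatMap, pvFlat_eq (c0 :: t)]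
  have hget : (PySem.List.pyGet? (c0 :: t) 0).getD ' ' = c0 := by
    simp [PySem.List.pyGet?, PySem.List.pyIdx?]
  rw [hget]
  have hzip : (c0 :: t).zip (c0 :: t).tail = List.zip (c0 :: t) t := by simp
  rw [hzip, pvPairs_Tt t c0]
  have hT : pvT ['u', 'o', 'i', 'e', 'a'] (c0 :: t)
      = (if c0 ∈ pvVowL then 'u' :: 'b' :: [c0] else [c0]) ++ pvTt ['u', 'o', 'i', 'e', 'a'] c0 t := by
    rw [pvT]
  rw [hT]
  exact pvCap_eq c0 (pvTt ['u', 'o', 'i', 'e', 'a'] c0 t)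
-- ===== VERDICT =====
theorem text2ubbi_spec : Claim_equal_text2ubbi := by
  intro sen _ hpre
  unfold Spec_text2ubbi text2ubbi text2ubbi_alt
  dsimp only []
  rw [PySem.List.foldl_append_singleton_eq_map, PySem.List.foldl_append_singleton_eq_map]
  congr 2
  apply List.map_congr_left
  intro w hw
  cases w with
  | nil => exact absurd rfl (hpre [] hw)
  | cons c0 t => exact pvWord_eq c0 t
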